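-- pv_equiv track=rewrite | github.com/dacodekid/dacodekid.com | docs/snippet/code-signal/arcade/intro/land-of-logic/file-naming/file-naming.py | file_naming
-- ===== SOURCE A (Python) =====
-- def file_naming(names):
--     new_names = []
--
--     for name in names:
--         if name in new_names:
--             index = 1
--             while f'{name}({index})' in new_names:
--                 index += 1
--             name = f'{name}({index})'
--         new_names.append(name)
--
--     return new_names
-- ===== SOURCE B (Python) =====
-- def file_naming(names):
--     used = {}  # emitted filename -> next index to try when it recurs as a base
--
--     def rename(base, k):
--         cand = f'{base}({k})'
--         if cand in used:
--             return rename(base, k + 1)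
--         used[base] = k + 1
--         used[cand] = 1
--         return cand
--
--     def claim(name):
--         if name not in used:
--             used[name] = 1
--             return name
--         return rename(name, used[name])
--
--     return [claim(n) for n in names]
-- ===== Notes on version B (the rewrite author's own statement) =====
-- stated objective: faster
-- what changed: B drops A's output list and its two linear scans entirely: a single dict maps every emitted filename to the next index to try for it, collisions are resolved by a recursive helper that walks the index chain through the dict, and the result is built by a comprehension over a stateful claim function (amortized O(n) instead of O(n^2) rescans).
import Mathlib
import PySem

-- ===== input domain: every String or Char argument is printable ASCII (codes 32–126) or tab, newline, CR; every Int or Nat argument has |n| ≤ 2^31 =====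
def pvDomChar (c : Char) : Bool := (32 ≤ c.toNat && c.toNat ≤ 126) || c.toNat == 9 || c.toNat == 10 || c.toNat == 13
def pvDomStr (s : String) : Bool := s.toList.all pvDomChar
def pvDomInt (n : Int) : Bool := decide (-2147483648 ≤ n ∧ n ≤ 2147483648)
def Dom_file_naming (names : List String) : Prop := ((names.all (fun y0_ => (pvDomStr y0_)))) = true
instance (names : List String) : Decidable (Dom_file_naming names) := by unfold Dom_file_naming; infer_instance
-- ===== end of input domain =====

-- B replaces A's output list and its linear scans by a single dict (emitted name -> next index
-- to try) and a recursive collision resolver (objective: faster, asymptotic).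

-- f'{name}({index})' — shared formatting helper (both Pythons build this same string)
def pvFmt (name : String) (i : Int) : String := name ++ "(" ++ PySem.Int.toStr i ++ ")"

-- ===== PORT A =====
-- Python 'while f'{name}(i)' in new_names: i += 1' — fuel-bounded search for the first free
-- index ≥ i. Fuel new_names.length + 1 always suffices (pvExistsFree below), so this is exact.
def pvFindFree (pool : List String) (name : String) : Nat → Int → Int
  | 0, i => i
  | f+1, i => if pvFmt name i ∈ pool then pvFindFree pool name f (i+1) else i

-- body of A's for-loop
def pvStepA (new_names : List String) (name : String) : List String :=
  if name ∈ new_names then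
    new_names ++ [pvFmt name (pvFindFree new_names name (new_names.length + 1) 1)]
  else
    new_names ++ [name]

def file_naming (names : List String) : List String :=
  names.foldl pvStepA []

-- ===== PORT B =====
-- B's recursive 'rename(base, k)': walk the index chain through the dict until the candidate
-- is not a key, then record base -> k+1 and cand -> 1.  The Python recursion terminates by
-- pigeonhole over the dict's keys; ported with fuel used.size + 1, which always suffices.
def pvRename (used : PySem.Dict String Int) (base : String) :
    Nat → Int → String × PySem.Dict String Int
  | 0, k => (pvFmt base k, used)  -- fuel exhausted: unreachable with fuel used.size + 1
  | f+1, k =>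
    if used.contains (pvFmt base k) then pvRename used base f (k+1)
    else (pvFmt base k, (used.insert base (k+1)).insert (pvFmt base k) 1)

-- B's 'claim(name)'
def pvClaim (used : PySem.Dict String Int) (name : String) :
    String × PySem.Dict String Int :=
  match used.get? name with
  | none => (name, used.insert name 1)
  | some k => pvRename used name (used.size + 1) k

-- B's list comprehension over the stateful claim
def file_naming_alt (names : List String) : List String :=
  (names.foldl (fun st n =>
      let r := pvClaim st.2 n
      (st.1 ++ [r.1], r.2))
    (([] : List String), (PySem.Dict.empty : PySem.Dict String Int))).1

-- ===== PRECONDITION & SPEC =====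
def Spec_file_naming (names : List String) (out : List String) : Prop := out = file_naming_alt names
instance (names : List String) (out : List String) : Decidable (Spec_file_naming names out) := by unfold Spec_file_naming; infer_instance

-- ===== CLAIM (what is proved, stated in full; the proofs are below) =====
def Claim_equal_file_naming : Prop := ∀ (names : List String), Dom_file_naming names → Spec_file_naming names (file_naming names)

-- ===== LEMMAS AND PROOFS =====

-- decode a base-10 digit string from the right: (scale, value)
def pvDecode (cs : List Char) : Nat × Nat :=
  cs.foldr (fun c p => (p.1 * 10, p.2 + (c.toNat - 48) * p.1)) (1, 0)

lemma pvDecode_cons (c : Char) (l : List Char) :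
    pvDecode (c :: l) = ((pvDecode l).1 * 10, (pvDecode l).2 + (c.toNat - 48) * (pvDecode l).1) := rfl

lemma pvDigitChar_toNat (d : Nat) (hd : d < 10) : (Nat.digitChar d).toNat = d + 48 := by
  interval_cases d <;> rfl

lemma pvToDigitsCore_decode : ∀ (f n : Nat) (l : List Char), n < f →
    ∃ s, pvDecode (Nat.toDigitsCore 10 f n l) = (s, n * (pvDecode l).1 + (pvDecode l).2) := by
  intro f
  induction f with
  | zero => intro n l h; omega
  | succ f ih =>
    intro n l h
    simp only [Nat.toDigitsCore]
    by_cases h0 : n / 10 = 0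
    · refine ⟨(pvDecode l).1 * 10, ?_⟩
      simp only [h0, if_true]
      rw [pvDecode_cons, pvDigitChar_toNat (n % 10) (Nat.mod_lt _ (by norm_num))]
      have h1 : n % 10 + 48 - 48 = n := by omega
      rw [h1, Prod.mk.injEq]
      exact ⟨rfl, by ring⟩
    · simp only [h0, if_false]
      obtain ⟨s, hs⟩ := ih (n / 10) (Nat.digitChar (n % 10) :: l) (by omega)
      refine ⟨s, ?_⟩
      rw [hs, pvDecode_cons, pvDigitChar_toNat (n % 10) (Nat.mod_lt _ (by norm_num))]
      have h1 : n % 10 + 48 - 48 = n % 10 := by omega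
      rw [h1, Prod.mk.injEq]
      refine ⟨rfl, ?_⟩
      simp only
      have hqr : 10 * (n / 10) + n % 10 = n := Nat.div_add_mod n 10
      nlinarith [hqr]

lemma pvToDigits_decode (n : Nat) : (pvDecode (Nat.toDigits 10 n)).2 = n := by
  obtain ⟨s, hs⟩ := pvToDigitsCore_decode (n + 1) n [] (by omega)
  unfold Nat.toDigits
  rw [hs]
  simp [pvDecode]

lemma pvToDigits_inj {m n : Nat} (h : Nat.toDigits 10 m = Nat.toDigits 10 n) : m = n := by
  have := congrArg (fun cs => (pvDecode cs).2) h
  simpa [pvToDigits_decode] using this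

lemma pvToChars_inj {i j : Int} (hi : 0 ≤ i) (hj : 0 ≤ j)
    (h : PySem.Int.toChars i = PySem.Int.toChars j) : i = j := by
  unfold PySem.Int.toChars at h
  rw [if_neg (by omega), if_neg (by omega)] at h
  have := pvToDigits_inj h
  omega

lemma pvFmt_inj {name : String} {i j : Int} (hi : 0 ≤ i) (hj : 0 ≤ j)
    (h : pvFmt name i = pvFmt name j) : i = j := by
  unfold pvFmt at h
  have h' := congrArg String.toList h
  simp only [String.toList_append, List.append_assoc] at h'
  have h1 := List.append_cancel_left h'
  have h2 := List.append_cancel_left h1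
  have h3 : (PySem.Int.toStr i).toList = (PySem.Int.toStr j).toList := List.append_cancel_right h2
  rw [PySem.Int.toList_toStr, PySem.Int.toList_toStr] at h3
  exact pvToChars_inj hi hj h3

-- pigeonhole: among pool.length + 1 distinct candidate names one is not in pool
lemma pvExistsFree (pool : List String) (name : String) (i : Int) (hi : 0 ≤ i) :
    ∃ j : Int, i ≤ j ∧ j < i + (pool.length + 1) ∧ pvFmt name j ∉ pool := by
  by_contra hcon
  push Not at hcon
  set L : List String := (List.range (pool.length + 1)).map (fun t : Nat => pvFmt name (i + (t : Int))) with hL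
  have hnd : L.Nodup := by
    refine (List.nodup_range).map_on ?_
    intro a _ b _ hab
    have := pvFmt_inj (by omega) (by omega) hab
    omega
  have hsub : ∀ x ∈ L, x ∈ pool := by
    intro x hx
    rw [hL, List.mem_map] at hx
    obtain ⟨t, ht, rfl⟩ := hx
    rw [List.mem_range] at ht
    exact hcon (i + t) (by omega) (by omega)
  have hlen : L.length = pool.length + 1 := by simp [hL]
  have : L.length ≤ pool.length := by
    calc L.length = L.toFinset.card := (List.toFinset_card_of_nodup hnd).symm
    _ ≤ pool.toFinset.card := Finset.card_le_card (fun x hx => List.mem_toFinset.mpr (hsub x (List.mem_toFinset.mp hx)))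
    _ ≤ pool.length := pool.toFinset_card_le
  omega

-- characterization of A's fuel-bounded search, given a free index inside the fuel window
lemma pvFindFree_char (pool : List String) (name : String) : ∀ (f : Nat) (i : Int),
    (∃ j : Int, i ≤ j ∧ j < i + f ∧ pvFmt name j ∉ pool) →
    pvFmt name (pvFindFree pool name f i) ∉ pool ∧ i ≤ pvFindFree pool name f i ∧
      ∀ m : Int, i ≤ m → m < pvFindFree pool name f i → pvFmt name m ∈ pool := by
  intro f
  induction f with
  | zero => intro i ⟨j, h1, h2, _⟩; omega
  | succ f ih =>
    intro i hex
    unfold pvFindFree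
    by_cases hmem : pvFmt name i ∈ pool
    · rw [if_pos hmem]
      obtain ⟨j, h1, h2, h3⟩ := hex
      have hji : j ≠ i := fun h => h3 (h ▸ hmem)
      obtain ⟨hfree, hge, hocc⟩ := ih (i + 1) ⟨j, by omega, by omega, h3⟩
      refine ⟨hfree, by omega, ?_⟩
      intro m hm1 hm2
      by_cases hmi : m = i
      · exact hmi ▸ hmem
      · exact hocc m (by omega) hm2
    · rw [if_neg hmem]
      exact ⟨hmem, le_refl i, fun m h1 h2 => absurd (lt_of_le_of_lt h1 h2) (lt_irrefl i)⟩

-- characterization of B's recursive resolver: it returns the first index ≥ k whose candidate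
-- is not a key, together with the two dict updates of the Python leaf
lemma pvRename_char (used : PySem.Dict String Int) (base : String) : ∀ (f : Nat) (k : Int),
    (∃ j : Int, k ≤ j ∧ j < k + f ∧ pvFmt base j ∉ used.keys) →
    ∃ j : Int, pvRename used base f k
        = (pvFmt base j, (used.insert base (j+1)).insert (pvFmt base j) 1)
      ∧ k ≤ j ∧ pvFmt base j ∉ used.keys
      ∧ ∀ m : Int, k ≤ m → m < j → pvFmt base m ∈ used.keys := by
  intro f
  induction f with
  | zero => intro k ⟨j, h1, h2, _⟩; omega
  | succ f ih =>
    intro k hex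
    unfold pvRename
    by_cases hmem : pvFmt base k ∈ used.keys
    · rw [if_pos ((PySem.Dict.contains_iff_mem_keys used (pvFmt base k)).mpr hmem)]
      obtain ⟨j, h1, h2, h3⟩ := hex
      have hjk : j ≠ k := fun h => h3 (h ▸ hmem)
      obtain ⟨j', heq, hge, hfree, hocc⟩ := ih (k + 1) ⟨j, by omega, by omega, h3⟩
      refine ⟨j', heq, by omega, hfree, ?_⟩
      intro m hm1 hm2
      by_cases hmk : m = k
      · exact hmk ▸ hmem
      · exact hocc m (by omega) hm2
    · rw [if_neg (by simpa [PySem.Dict.contains_iff_mem_keys] using hmem)]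
      exact ⟨k, rfl, le_refl k, hmem,
        fun m h1 h2 => absurd (lt_of_le_of_lt h1 h2) (lt_irrefl k)⟩

-- the two folds agree, given that the dict's keys mirror A's output list and every stored
-- value is a sound lower bound for the next free index of its key
lemma pvMain : ∀ (names : List String) (acc : List String) (used : PySem.Dict String Int),
    (∀ x, x ∈ used.keys ↔ x ∈ acc) →
    (∀ nm k, used.get? nm = some k → 1 ≤ k ∧ ∀ m : Int, 1 ≤ m → m < k → pvFmt nm m ∈ acc) →
    names.foldl pvStepA acc
      = (names.foldl (fun st n => let r := pvClaim st.2 n; (st.1 ++ [r.1], r.2)) (acc, used)).1 := by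
  intro names
  induction names with
  | nil => intro acc used _ _; rfl
  | cons nm names ih =>
    intro acc used hmem hval
    simp only [List.foldl_cons]
    by_cases hin : nm ∈ acc
    · have hk0 : ∃ k0, used.get? nm = some k0 := by
        cases hg : used.get? nm with
        | some k => exact ⟨k, rfl⟩
        | none =>
          exfalso
          have : nm ∉ used.keys := (PySem.Dict.get?_eq_none_iff_not_mem_keys used nm).mp hg
          exact this ((hmem nm).mpr hin)
      obtain ⟨k0, hg⟩ := hk0
      obtain ⟨hk01, hk0occ⟩ := hval nm k0 hg
      have hkeylen : used.keys.length = used.size := by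
        simp [PySem.Dict.keys, PySem.Dict.size]
      obtain ⟨jB, heqB, hBge, hBfree', hBocc'⟩ :=
        pvRename_char used nm (used.size + 1) k0
          (by rw [← hkeylen]; exact pvExistsFree used.keys nm k0 (by omega))
      have hBfree : pvFmt nm jB ∉ acc := fun h => hBfree' ((hmem _).mpr h)
      have hBocc : ∀ m : Int, 1 ≤ m → m < jB → pvFmt nm m ∈ acc := by
        intro m h1 h2
        by_cases hm : m < k0
        · exact hk0occ m h1 hm
        · exact (hmem _).mp (hBocc' m (by omega) h2)
      set jA : Int := pvFindFree acc nm (acc.length + 1) 1 with hjA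
      obtain ⟨hAfree, hAge, hAocc⟩ :=
        pvFindFree_char acc nm (acc.length + 1) 1 (pvExistsFree acc nm 1 (by omega))
      have hAB : jA = jB := by
        rcases lt_trichotomy jA jB with h | h | h
        · exact absurd (hBocc jA hAge h) hAfree
        · exact h
        · exact absurd (hAocc jB (by omega) h) hBfree
      have hA : pvStepA acc nm = acc ++ [pvFmt nm jB] := by
        rw [pvStepA, if_pos hin, ← hjA, hAB]
      have hB : pvClaim used nm = (pvFmt nm jB, (used.insert nm (jB+1)).insert (pvFmt nm jB) 1) := by
        rw [pvClaim, hg]; exact heqB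
      simp only [hB, hA]
      apply ih
      · intro x
        simp only [PySem.Dict.mem_keys_insert, List.mem_append, List.mem_singleton]
        constructor
        · rintro (h | h | h)
          · exact Or.inr h
          · exact Or.inl (h ▸ hin)
          · exact Or.inl ((hmem x).mp h)
        · rintro (h | h)
          · exact Or.inr (Or.inr ((hmem x).mpr h))
          · exact Or.inl h
      · intro nm' k' hg'
        by_cases h1 : nm' = pvFmt nm jB
        · subst h1
          rw [PySem.Dict.get?_insert_self] at hg'
          injection hg' with hg'
          refine ⟨by omega, ?_⟩
          intro m hm1 hm2
          omega
        · rw [PySem.Dict.get?_insert_of_ne _ _ h1] at hg'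
          by_cases h2 : nm' = nm
          · subst h2
            rw [PySem.Dict.get?_insert_self] at hg'
            injection hg' with hg'
            refine ⟨by omega, ?_⟩
            intro m hm1 hm2
            rw [List.mem_append]
            by_cases hmj : m = jB
            · exact Or.inr (by simp [hmj])
            · exact Or.inl (hBocc m hm1 (by omega))
          · rw [PySem.Dict.get?_insert_of_ne _ _ h2] at hg'
            obtain ⟨ha, hb⟩ := hval nm' k' hg'
            exact ⟨ha, fun m hm1 hm2 => List.mem_append.mpr (Or.inl (hb m hm1 hm2))⟩
    · have hgnone : used.get? nm = none := by
        rw [PySem.Dict.get?_eq_none_iff_not_mem_keys used nm]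
        exact fun h => hin ((hmem nm).mp h)
      have hA : pvStepA acc nm = acc ++ [nm] := by rw [pvStepA, if_neg hin]
      have hB : pvClaim used nm = (nm, used.insert nm 1) := by rw [pvClaim, hgnone]
      simp only [hB, hA]
      apply ih
      · intro x
        simp only [PySem.Dict.mem_keys_insert, List.mem_append, List.mem_singleton]
        constructor
        · rintro (h | h)
          · exact Or.inr h
          · exact Or.inl ((hmem x).mp h)
        · rintro (h | h)
          · exact Or.inr ((hmem x).mpr h)
          · exact Or.inl h
      · intro nm' k' hg'
        by_cases h1 : nm' = nm
        · subst h1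
          rw [PySem.Dict.get?_insert_self] at hg'
          injection hg' with hg'
          exact ⟨by omega, fun m hm1 hm2 => by omega⟩
        · rw [PySem.Dict.get?_insert_of_ne _ _ h1] at hg'
          obtain ⟨ha, hb⟩ := hval nm' k' hg'
          exact ⟨ha, fun m hm1 hm2 => List.mem_append.mpr (Or.inl (hb m hm1 hm2))⟩

-- ===== VERDICT (by name: the statement is the Claim_ definition above) =====
theorem file_naming_spec : Claim_equal_file_naming := by
  intro names _
  unfold Spec_file_naming file_naming file_naming_alt
  exact pvMain names [] PySem.Dict.empty
    (by intro x; simp [PySem.Dict.keys_empty])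
    (by intro nm k hg; rw [PySem.Dict.get?_empty] at hg; exact absurd hg (by simp))
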